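-- pv_equiv track=rewrite | github.com/syz007110/ragKnowledge | document-service/app/services/chunking.py | _split_long_paragraph
-- ===== SOURCE A (Python) =====
-- def _split_long_paragraph(text: str, max_chunk_size: int) -> list[str]:
--     words = str(text or "").split()
--     if not words:
--         return []
--     chunks: list[str] = []
--     current: list[str] = []
--     current_len = 0
--     for word in words:
--         additional = len(word) if not current else len(word) + 1
--         if current and current_len + additional > max_chunk_size:
--             chunks.append(" ".join(current))
--             current = [word]
--             current_len = len(word)
--             continue
--         current.append(word)
--         current_len += additional
--     if current:
--         chunks.append(" ".join(current))
--     return chunks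
-- ===== SOURCE B (Python) =====
-- def _split_long_paragraph(text: str, max_chunk_size: int) -> list[str]:
--     words = str(text or "").split()
--     n = len(words)
--     # prefix[k] = total length of the first k words if each carried one trailing space,
--     # so the joined length of words[i:j] is prefix[j] - prefix[i] - 1.
--     prefix = [0]
--     for w in words:
--         prefix.append(prefix[-1] + len(w) + 1)
--     chunks: list[str] = []
--     i = 0
--     while i < n:
--         # largest j in [i+1, n] with prefix[j] <= limit (i.e. words[i:j] fits),
--         # found by binary search on the strictly increasing prefix array;
--         # defaults to i+1 so an oversized word still forms its own chunk.
--         limit = prefix[i] + max_chunk_size + 1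
--         lo, hi = i + 1, n
--         while lo < hi:
--             mid = (lo + hi + 1) // 2
--             if prefix[mid] <= limit:
--                 lo = mid
--             else:
--                 hi = mid - 1
--         chunks.append(" ".join(words[i:lo]))
--         i = lo
--     return chunks
-- ===== Notes on version B (the rewrite author's own statement) =====
-- stated objective: alternative
-- what changed: B precomputes a prefix-sum array of word costs (len+1) in one pass and then finds each chunk boundary by binary search on that array, instead of A's single greedy pass that packs a current list with a running length accumulator.
import Mathlib
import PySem

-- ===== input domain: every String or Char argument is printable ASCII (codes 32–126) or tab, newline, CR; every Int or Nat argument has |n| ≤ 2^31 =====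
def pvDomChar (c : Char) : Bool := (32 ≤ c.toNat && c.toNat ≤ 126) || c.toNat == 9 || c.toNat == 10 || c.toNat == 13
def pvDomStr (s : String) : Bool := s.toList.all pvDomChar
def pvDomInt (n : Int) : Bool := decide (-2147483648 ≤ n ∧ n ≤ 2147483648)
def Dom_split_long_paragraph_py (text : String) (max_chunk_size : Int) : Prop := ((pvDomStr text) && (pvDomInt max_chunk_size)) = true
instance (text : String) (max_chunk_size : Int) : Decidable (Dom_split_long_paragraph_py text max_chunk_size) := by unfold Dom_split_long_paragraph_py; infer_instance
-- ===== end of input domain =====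

-- B replaces A's single greedy accumulation pass by prefix sums of word costs plus a
-- binary search for each chunk boundary (objective: alternative; not measured faster).

-- ===== PORT A =====
-- one loop step of A: state = (chunks, current, current_len)
def stepA (max_chunk_size : Int) (st : List String × List String × Int) (word : String) :
    List String × List String × Int :=
  let chunks := st.1
  let current := st.2.1
  let current_len := st.2.2
  let additional : Int :=
    if current = [] then PySem.Str.len word else PySem.Str.len word + 1
  if current ≠ [] ∧ current_len + additional > max_chunk_size then
    (chunks ++ [PySem.Str.join " " current], [word], PySem.Str.len word)
  else
    (chunks, current ++ [word], current_len + additional)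

def split_long_paragraph_py (text : String) (max_chunk_size : Int) : List String :=
  let words := PySem.Str.split₀ text          -- str(text or "").split(): '' splits the same
  if words = [] then []
  else
    let st := words.foldl (stepA max_chunk_size) ([], [], 0)
    if st.2.1 ≠ [] then st.1 ++ [PySem.Str.join " " st.2.1] else st.1

-- ===== PORT B =====
-- prefix-array construction: `prefix.append(prefix[-1] + len(w) + 1)` (prefix is never empty,
-- so prefix[-1] is its last element)
def buildPrefixB : List String → List Int → List Int
  | [], p => p
  | w :: ws, p => buildPrefixB ws (p ++ [p.getLast?.getD 0 + PySem.Str.len w + 1])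

-- the inner `while lo < hi` binary search; all reads p[mid] have mid ≤ hi ≤ len(p)-1, in range.
-- `fuel` is only a structural totality guard: fuel = hi - lo always suffices.
def bsearchGo (p : List Int) (limit : Int) : Nat → Nat → Nat → Nat
  | 0, lo, _ => lo
  | fuel + 1, lo, hi =>
    if lo < hi then
      let mid := (lo + hi + 1) / 2
      if p.getD mid 0 ≤ limit then bsearchGo p limit fuel mid hi
      else bsearchGo p limit fuel lo (mid - 1)
    else lo

def bsearchB (p : List Int) (limit : Int) (lo hi : Nat) : Nat :=
  bsearchGo p limit (hi - lo) lo hi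

-- the outer `while i < n` loop over chunk start indices; `fuel` is only a structural totality
-- guard: fuel = words.length always suffices because the break index strictly increases.
def packGo (words : List String) (p : List Int) (max_chunk_size : Int) :
    Nat → Nat → List String → List String
  | 0, _, chunks => chunks
  | fuel + 1, i, chunks =>
    if i < words.length then
      let limit := p.getD i 0 + max_chunk_size + 1   -- p[i] read in range (i < n)
      let j := bsearchB p limit (i + 1) words.length
      packGo words p max_chunk_size fuel j
        (chunks ++ [PySem.Str.join " " (PySem.List.slice words (some (i : Int)) (some (j : Int)))])
    else chunks

def split_long_paragraph_py_alt (text : String) (max_chunk_size : Int) : List String :=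
  let words := PySem.Str.split₀ text
  let p := buildPrefixB words [0]
  packGo words p max_chunk_size words.length 0 []

-- ===== PRECONDITION & SPEC =====
def Spec_split_long_paragraph_py (text : String) (max_chunk_size : Int) (out : List String) : Prop := out = split_long_paragraph_py_alt text max_chunk_size
instance (text : String) (max_chunk_size : Int) (out : List String) : Decidable (Spec_split_long_paragraph_py text max_chunk_size out) := by unfold Spec_split_long_paragraph_py; infer_instance

-- ===== CLAIM (what is proved, stated in full; the proofs are below) =====
def Claim_equal_split_long_paragraph_py : Prop := ∀ (text : String) (max_chunk_size : Int), Dom_split_long_paragraph_py text max_chunk_size → Spec_split_long_paragraph_py text max_chunk_size (split_long_paragraph_py text max_chunk_size)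

-- ===== LEMMAS AND PROOFS =====

-- joined length of a single word
lemma jlen_single (w : String) : PySem.Str.len (PySem.Str.join " " [w]) = PySem.Str.len w := by
  simp [PySem.Str.len_eq, PySem.Str.toList_join, PySem.Chars.join_singleton]

-- appending a word to a nonempty group adds its length plus one separator
lemma jlen_append (cur : List String) (w : String) (h : cur ≠ []) :
    PySem.Str.len (PySem.Str.join " " (cur ++ [w]))
      = PySem.Str.len (PySem.Str.join " " cur) + 1 + PySem.Str.len w := by
  induction cur with
  | nil => exact absurd rfl h
  | cons x rest ih =>
    cases rest with
    | nil =>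
      simp [PySem.Str.len_eq, PySem.Str.toList_join, PySem.Chars.join_singleton,
            PySem.Chars.join_cons_cons]
      omega
    | cons y rest' =>
      have hne : (y :: rest') ≠ ([] : List String) := by simp
      have := ih hne
      simp only [List.cons_append, PySem.Str.len_eq, PySem.Str.toList_join, List.map_cons,
        PySem.Chars.join_cons_cons] at *
      simp only [List.length_append] at *
      push_cast at *
      omega

lemma strlen_nonneg (w : String) : 0 ≤ PySem.Str.len w := by
  simp [PySem.Str.len_eq]

-- ---- the common greedy specification both programs compute ----

-- grab the words that still fit after `cur` (whose joined length is `l`)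
def grabG (mcs : Int) : List String → Int → List String → List String × List String
  | cur, _, [] => (cur, [])
  | cur, l, x :: xs =>
    if l + (PySem.Str.len x + 1) ≤ mcs then grabG mcs (cur ++ [x]) (l + (PySem.Str.len x + 1)) xs
    else (cur, x :: xs)

lemma grabG_rest_length (mcs : Int) :
    ∀ (ws cur : List String) (l : Int), (grabG mcs cur l ws).2.length ≤ ws.length := by
  intro ws
  induction ws with
  | nil => intro cur l; simp [grabG]
  | cons x xs ih =>
    intro cur l
    simp only [grabG]
    split
    · exact le_trans (ih _ _) (by simp)
    · simp

def greedyG (mcs : Int) : List String → List String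
  | [] => []
  | w :: ws =>
    PySem.Str.join " " (grabG mcs [w] (PySem.Str.len w) ws).1
      :: greedyG mcs (grabG mcs [w] (PySem.Str.len w) ws).2
termination_by ws => ws.length
decreasing_by
  have := grabG_rest_length mcs ws [w] (PySem.Str.len w)
  simpa using Nat.lt_succ_of_le this

-- ---- A computes the greedy specification ----

lemma A_loop (mcs : Int) :
    ∀ (ws cur chunks : List String), cur ≠ [] →
      (let st := ws.foldl (stepA mcs) (chunks, cur, PySem.Str.len (PySem.Str.join " " cur))
       if st.2.1 ≠ [] then st.1 ++ [PySem.Str.join " " st.2.1] else st.1)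
      = chunks
        ++ (PySem.Str.join " " (grabG mcs cur (PySem.Str.len (PySem.Str.join " " cur)) ws).1
            :: greedyG mcs (grabG mcs cur (PySem.Str.len (PySem.Str.join " " cur)) ws).2) := by
  intro ws
  induction ws with
  | nil =>
    intro cur chunks h
    simp [grabG, greedyG, h]
  | cons x xs ih =>
    intro cur chunks h
    simp only [List.foldl_cons, grabG]
    by_cases hfit : PySem.Str.len (PySem.Str.join " " cur) + (PySem.Str.len x + 1) ≤ mcs
    · -- the word fits: both sides continue with cur ++ [x]
      have hstep : stepA mcs (chunks, cur, PySem.Str.len (PySem.Str.join " " cur)) x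
          = (chunks, cur ++ [x], PySem.Str.len (PySem.Str.join " " (cur ++ [x]))) := by
        simp only [stepA, if_neg h]
        rw [if_neg (by rintro ⟨-, hgt⟩; omega)]
        have := jlen_append cur x h
        simp only [Prod.mk.injEq, true_and]
        omega
      rw [hstep, if_pos hfit]
      have harg : PySem.Str.len (PySem.Str.join " " cur) + (PySem.Str.len x + 1)
          = PySem.Str.len (PySem.Str.join " " (cur ++ [x])) := by
        have := jlen_append cur x h
        omega
      rw [harg]
      exact ih (cur ++ [x]) chunks (by simp)
    · -- the word does not fit: A flushes, the spec closes the chunk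
      have hstep : stepA mcs (chunks, cur, PySem.Str.len (PySem.Str.join " " cur)) x
          = (chunks ++ [PySem.Str.join " " cur], [x], PySem.Str.len x) := by
        simp only [stepA, if_neg h]
        rw [if_pos ⟨h, by omega⟩]
      rw [hstep, if_neg hfit]
      have hx : PySem.Str.len x = PySem.Str.len (PySem.Str.join " " [x]) := (jlen_single x).symm
      rw [hx]
      have := ih [x] (chunks ++ [PySem.Str.join " " cur]) (by simp)
      rw [this]
      have hg : greedyG mcs (x :: xs)
          = PySem.Str.join " " (grabG mcs [x] (PySem.Str.len (PySem.Str.join " " [x])) xs).1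
            :: greedyG mcs (grabG mcs [x] (PySem.Str.len (PySem.Str.join " " [x])) xs).2 := by
        rw [greedyG, jlen_single]
      rw [hg]
      simp

lemma partA (text : String) (mcs : Int) :
    split_long_paragraph_py text mcs = greedyG mcs (PySem.Str.split₀ text) := by
  unfold split_long_paragraph_py
  cases hw : PySem.Str.split₀ text with
  | nil => simp [greedyG]
  | cons w ws =>
    simp only [if_neg (List.cons_ne_nil w ws), List.foldl_cons]
    have hstep : stepA mcs ([], [], 0) w
        = ([], [w], PySem.Str.len (PySem.Str.join " " [w])) := by
      simp [stepA]
    rw [hstep]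
    have := A_loop mcs ws [w] [] (by simp)
    simp only [List.nil_append] at this
    rw [this, greedyG, jlen_single]

-- ---- B computes the greedy specification ----

-- prefix cost: each of the first k words costs its length plus one trailing space
def Pfun (words : List String) (k : Nat) : Int :=
  ((words.take k).map (fun w => PySem.Str.len w + 1)).sum

lemma Pfun_zero (words : List String) : Pfun words 0 = 0 := by simp [Pfun]

lemma Pfun_succ (words : List String) (k : Nat) (h : k < words.length) :
    Pfun words (k + 1) = Pfun words k + (PySem.Str.len words[k] + 1) := by
  have hk : k < (words.map (fun w => PySem.Str.len w + 1)).length := by simpa using h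
  unfold Pfun
  rw [List.map_take, List.map_take, List.sum_take_succ _ k hk, List.getElem_map]

lemma Pfun_mono (words : List String) :
    ∀ (b a : Nat), a ≤ b → b ≤ words.length → Pfun words a ≤ Pfun words b := by
  intro b
  induction b with
  | zero =>
    intro a h1 _
    have : a = 0 := by omega
    subst this; exact le_refl _
  | succ m ih =>
    intro a h1 h2
    rcases Nat.lt_or_ge a (m + 1) with hlt | hge
    · have hm : m < words.length := by omega
      have hs := Pfun_succ words m hm
      have hlen := strlen_nonneg words[m]
      have := ih a (by omega) (by omega)
      omega
    · have : a = m + 1 := by omega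
      subst this; exact le_refl _

-- the Python list `prefix` reads back these prefix costs
def psumsB (s : Int) : List String → List Int
  | [] => []
  | w :: ws => (s + PySem.Str.len w + 1) :: psumsB (s + PySem.Str.len w + 1) ws

lemma buildPrefixB_psums :
    ∀ (ws : List String) (acc : List Int), acc ≠ [] →
      buildPrefixB ws acc = acc ++ psumsB (acc.getLast?.getD 0) ws := by
  intro ws
  induction ws with
  | nil => intro acc h; simp [buildPrefixB, psumsB]
  | cons w rest ih =>
    intro acc h
    rw [buildPrefixB, ih _ (by simp)]
    have hlast : (acc ++ [acc.getLast?.getD 0 + PySem.Str.len w + 1]).getLast?.getD 0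
        = acc.getLast?.getD 0 + PySem.Str.len w + 1 := by
      simp [List.getLast?_append]
    rw [hlast]
    simp [psumsB]

lemma psumsB_getD (words : List String) :
    ∀ (ws : List String) (m k : Nat), ws = words.drop m → k < ws.length →
      (psumsB (Pfun words m) ws).getD k 0 = Pfun words (m + k + 1) := by
  intro ws
  induction ws with
  | nil => intro m k _ h; simp at h
  | cons w rest ih =>
    intro m k hws hk
    have hmlt : m < words.length := by
      by_contra hge
      rw [List.drop_eq_nil_of_le (by omega)] at hws
      exact (List.cons_ne_nil w rest) hws
    have hcons := List.drop_eq_getElem_cons hmlt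
    rw [hcons] at hws
    have hw1 : w = words[m] := ((List.cons.injEq ..).mp hws).1
    have hw2 : rest = words.drop (m + 1) := ((List.cons.injEq ..).mp hws).2
    have hstep : Pfun words m + PySem.Str.len w + 1 = Pfun words (m + 1) := by
      rw [Pfun_succ words m hmlt, hw1]; ring
    cases k with
    | zero =>
      simp only [psumsB, List.getD_cons_zero]
      rw [hstep]
    | succ k' =>
      simp only [psumsB, List.getD_cons_succ]
      rw [hstep]
      have hkrest : k' < rest.length := by simpa using hk
      have := ih (m + 1) k' hw2 hkrest
      rw [this]
      congr 1
      omega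

-- the array B builds agrees with Pfun at every index up to n
lemma prefix_getD (words : List String) (k : Nat) (hk : k ≤ words.length) :
    (buildPrefixB words [0]).getD k 0 = Pfun words k := by
  rw [buildPrefixB_psums words [0] (by simp)]
  cases k with
  | zero => simp [Pfun_zero]
  | succ k' =>
    have h0 : ([(0 : Int)] : List Int).getLast?.getD 0 = Pfun words 0 := by simp [Pfun_zero]
    rw [h0]
    have hcons : ([(0 : Int)] : List Int) ++ psumsB (Pfun words 0) words
        = 0 :: psumsB (Pfun words 0) words := by simp
    rw [hcons, List.getD_cons_succ]
    have hk' : k' < words.length := by omega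
    have := psumsB_getD words words 0 k' (by simp) hk'
    simpa using this

-- linear characterisation of the break index
def lscanG (P : Nat → Int) (limit : Int) (n : Nat) (j : Nat) : Nat :=
  if j < n ∧ P (j + 1) ≤ limit then lscanG P limit n (j + 1) else j
termination_by n - j
decreasing_by omega

-- `Good` pins the break index uniquely (for a P monotone up to n)
lemma good_unique (P : Nat → Int) (limit : Int) (n lo0 : Nat)
    (hmono : ∀ a b, a ≤ b → b ≤ n → P a ≤ P b)
    (r1 r2 : Nat)
    (h1 : lo0 ≤ r1 ∧ r1 ≤ n ∧ (r1 = lo0 ∨ P r1 ≤ limit) ∧ (r1 < n → limit < P (r1 + 1)))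
    (h2 : lo0 ≤ r2 ∧ r2 ≤ n ∧ (r2 = lo0 ∨ P r2 ≤ limit) ∧ (r2 < n → limit < P (r2 + 1))) :
    r1 = r2 := by
  by_contra hne
  rcases Nat.lt_or_ge r1 r2 with hlt | hge
  · rcases h2.2.2.1 with he | hle
    · omega
    · have := h1.2.2.2 (by omega)
      have := hmono (r1 + 1) r2 (by omega) h2.2.1
      omega
  · have hlt : r2 < r1 := by omega
    rcases h1.2.2.1 with he | hle
    · omega
    · have := h2.2.2.2 (by omega)
      have := hmono (r2 + 1) r1 (by omega) h1.2.1
      omega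

lemma lscanG_good (P : Nat → Int) (limit : Int) (n : Nat) :
    ∀ (j : Nat), j ≤ n →
      j ≤ lscanG P limit n j ∧ lscanG P limit n j ≤ n ∧
      (lscanG P limit n j = j ∨ P (lscanG P limit n j) ≤ limit) ∧
      (lscanG P limit n j < n → limit < P (lscanG P limit n j + 1)) := by
  intro j
  fun_induction lscanG P limit n j with
  | case1 j h ih =>
    intro _
    have := ih (by omega)
    refine ⟨by omega, this.2.1, ?_, this.2.2.2⟩
    rcases this.2.2.1 with he | hle
    · right; rw [he]; exact h.2
    · right; exact hle
  | case2 j h =>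
    intro hj
    exact ⟨le_refl _, hj, Or.inl rfl, fun hlt => by
      rcases Decidable.not_and_iff_or_not.mp h with h1 | h2
      · omega
      · omega⟩

lemma bsearchGo_good (arr : List Int) (P : Nat → Int) (limit : Int) (n lo0 : Nat)
    (hread : ∀ k, k ≤ n → arr.getD k 0 = P k) :
    ∀ (fuel lo hi : Nat), hi - lo ≤ fuel → lo0 ≤ lo → lo ≤ hi → hi ≤ n →
      (lo = lo0 ∨ P lo ≤ limit) → (hi = n ∨ limit < P (hi + 1)) →
      lo0 ≤ bsearchGo arr limit fuel lo hi ∧ bsearchGo arr limit fuel lo hi ≤ n ∧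
      (bsearchGo arr limit fuel lo hi = lo0 ∨ P (bsearchGo arr limit fuel lo hi) ≤ limit) ∧
      (bsearchGo arr limit fuel lo hi < n → limit < P (bsearchGo arr limit fuel lo hi + 1)) := by
  intro fuel
  induction fuel with
  | zero =>
    intro lo hi hf hlo0 hlohi hhin hloP hhiP
    have hlohieq : lo = hi := by omega
    subst hlohieq
    simp only [bsearchGo]
    refine ⟨hlo0, hhin, hloP, fun hlt => ?_⟩
    rcases hhiP with he | hP
    · omega
    · exact hP
  | succ f ih =>
    intro lo hi hf hlo0 hlohi hhin hloP hhiP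
    simp only [bsearchGo]
    by_cases hlt : lo < hi
    · rw [if_pos hlt]
      by_cases hle : arr.getD ((lo + hi + 1) / 2) 0 ≤ limit
      · rw [if_pos hle]
        rw [hread ((lo + hi + 1) / 2) (by omega)] at hle
        exact ih ((lo + hi + 1) / 2) hi (by omega) (by omega) (by omega) hhin (Or.inr hle) hhiP
      · rw [if_neg hle]
        rw [hread ((lo + hi + 1) / 2) (by omega)] at hle
        have hstep : limit < P ((lo + hi + 1) / 2 - 1 + 1) := by
          have heq : (lo + hi + 1) / 2 - 1 + 1 = (lo + hi + 1) / 2 := by omega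
          rw [heq]; omega
        exact ih lo ((lo + hi + 1) / 2 - 1) (by omega) hlo0 (by omega) (by omega) hloP
          (Or.inr hstep)
    · rw [if_neg hlt]
      have hlohieq : lo = hi := by omega
      subst hlohieq
      refine ⟨hlo0, hhin, hloP, fun h2 => ?_⟩
      rcases hhiP with he | hP
      · omega
      · exact hP

-- B's binary search finds the same break index as the linear scan
lemma bsearchB_eq_lscanG (arr : List Int) (P : Nat → Int) (limit : Int) (n : Nat)
    (hread : ∀ k, k ≤ n → arr.getD k 0 = P k)
    (hmono : ∀ a b, a ≤ b → b ≤ n → P a ≤ P b)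
    (lo0 : Nat) (hlo0 : lo0 ≤ n) :
    bsearchB arr limit lo0 n = lscanG P limit n lo0 := by
  exact good_unique P limit n lo0 hmono _ _
    (bsearchGo_good arr P limit n lo0 hread (n - lo0) lo0 n (le_refl _) (le_refl _) hlo0
      (le_refl _) (Or.inl rfl) (Or.inl rfl))
    (lscanG_good P limit n lo0 hlo0)

-- slices of words, Nat form
lemma slice_snoc (words : List String) (i m : Nat) (hi : i ≤ m) (hm : m < words.length) :
    (words.drop i).take (m - i) ++ [words[m]] = (words.drop i).take (m + 1 - i) := by
  have hlen : m - i < (words.drop i).length := by simp; omega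
  have hget : (words.drop i)[m - i]'hlen = words[m] := by
    rw [List.getElem_drop]
    congr 1; omega
  rw [← hget, ← List.concat_eq_append, List.take_concat_get]
  congr 1; omega

-- the main alignment: grabbing from slice words[i:m] follows the same steps as the linear scan
lemma grab_eq_lscan (words : List String) (mcs : Int) (i : Nat) :
    ∀ (m : Nat), i < m → m ≤ words.length →
      grabG mcs ((words.drop i).take (m - i)) (Pfun words m - Pfun words i - 1) (words.drop m)
        = ((words.drop i).take (lscanG (Pfun words) (Pfun words i + mcs + 1) words.length m - i),
           words.drop (lscanG (Pfun words) (Pfun words i + mcs + 1) words.length m)) := by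
  intro m
  fun_induction lscanG (Pfun words) (Pfun words i + mcs + 1) words.length m with
  | case1 m h ih =>
    intro him hm
    obtain ⟨hmn, hP⟩ := h
    rw [List.drop_eq_getElem_cons hmn]
    have hPsucc := Pfun_succ words m hmn
    rw [grabG]
    rw [if_pos (by omega)]
    have harg : Pfun words m - Pfun words i - 1 + (PySem.Str.len words[m] + 1)
        = Pfun words (m + 1) - Pfun words i - 1 := by omega
    rw [slice_snoc words i m (by omega) hmn, harg]
    exact ih (by omega) (by omega)
  | case2 m h =>
    intro him hm
    cases hd : words.drop m with
    | nil =>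
      rw [grabG]
    | cons x xs =>
      have hmn : m < words.length := by
        by_contra hge
        rw [List.drop_eq_nil_of_le (by omega)] at hd; exact (List.cons_ne_nil x xs) hd.symm
      have hx : x = words[m] := by
        have := List.drop_eq_getElem_cons hmn
        rw [hd] at this
        exact ((List.cons.injEq ..).mp this).1
      have hPsucc := Pfun_succ words m hmn
      have hnofit : ¬ Pfun words m - Pfun words i - 1 + (PySem.Str.len x + 1) ≤ mcs := by
        rw [hx]
        rcases Decidable.not_and_iff_or_not.mp h with h1 | h2
        · omega
        · omega
      rw [grabG, if_neg hnofit]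

-- the outer loop emits exactly the greedy chunks from position i on
lemma packGo_eq_greedy (words : List String) (arr : List Int) (mcs : Int)
    (hread : ∀ k, k ≤ words.length → arr.getD k 0 = Pfun words k) :
    ∀ (fuel i : Nat) (chunks : List String), words.length - i ≤ fuel →
      packGo words arr mcs fuel i chunks = chunks ++ greedyG mcs (words.drop i) := by
  have hmono : ∀ a b, a ≤ b → b ≤ words.length → Pfun words a ≤ Pfun words b :=
    fun a b hab hb => Pfun_mono words b a hab hb
  intro fuel
  induction fuel with
  | zero =>
    intro i chunks hf
    rw [List.drop_eq_nil_of_le (by omega)]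
    simp [packGo, greedyG]
  | succ f ih =>
    intro i chunks hf
    simp only [packGo]
    by_cases h : i < words.length
    · rw [if_pos h]
      set limit := arr.getD i 0 + mcs + 1 with hlimitv
      set j := bsearchB arr limit (i + 1) words.length with hjv
      have hlimit : limit = Pfun words i + mcs + 1 := by
        rw [hlimitv, hread i (by omega)]
      have hj : j = lscanG (Pfun words) (Pfun words i + mcs + 1) words.length (i + 1) := by
        rw [hjv, hlimit]
        exact bsearchB_eq_lscanG arr (Pfun words) (Pfun words i + mcs + 1) words.length hread
          hmono (i + 1) (by omega)
      set J := lscanG (Pfun words) (Pfun words i + mcs + 1) words.length (i + 1) with hJ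
      have hJge : i + 1 ≤ J := (lscanG_good (Pfun words) (Pfun words i + mcs + 1)
        words.length (i + 1) (by omega)).1
      have hdropi : words.drop i = words[i] :: words.drop (i + 1) := List.drop_eq_getElem_cons h
      have hgrab := grab_eq_lscan words mcs i (i + 1) (by omega) (by omega)
      have hslice1 : (words.drop i).take (i + 1 - i) = [words[i]] := by
        rw [show i + 1 - i = 1 by omega, hdropi]
        rfl
      have hlen1 : Pfun words (i + 1) - Pfun words i - 1 = PySem.Str.len words[i] := by
        have := Pfun_succ words i h
        omega
      rw [hslice1, hlen1] at hgrab
      have hgreedy : greedyG mcs (words.drop i)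
          = PySem.Str.join " " ((words.drop i).take (J - i)) :: greedyG mcs (words.drop J) := by
        rw [hdropi, greedyG, ← hdropi]
        rw [hgrab]
      rw [ih j _ (by rw [hj]; omega), hgreedy]
      have hslice : PySem.List.slice words (some (i : Int)) (some ((j : Nat) : Int))
          = (words.drop i).take (j - i) := PySem.List.slice_natCast words i j
      rw [hslice, hj]
      simp
    · rw [if_neg h]
      rw [List.drop_eq_nil_of_le (by omega)]
      simp [greedyG]

lemma partB (text : String) (mcs : Int) :
    split_long_paragraph_py_alt text mcs = greedyG mcs (PySem.Str.split₀ text) := by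
  unfold split_long_paragraph_py_alt
  have := packGo_eq_greedy (PySem.Str.split₀ text)
    (buildPrefixB (PySem.Str.split₀ text) [0]) mcs
    (fun k hk => prefix_getD (PySem.Str.split₀ text) k hk)
    (PySem.Str.split₀ text).length 0 [] (by omega)
  simpa using this

-- ===== VERDICT (by name: the statement is the Claim_ definition above) =====
theorem split_long_paragraph_py_spec : Claim_equal_split_long_paragraph_py := by
  intro text max_chunk_size _
  unfold Spec_split_long_paragraph_py
  rw [partA, partB]
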